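-- pv_equiv track=rewrite | github.com/tsigemariamzewdu/leetcode-sync | 2456-construct-smallest-number-from-di-string/construct-smallest-number-from-di-string.py | smallestNumber
-- ===== SOURCE A (Python) =====
-- def smallestNumber(pattern: str) -> str:
--     path=[]
--     ans=[]
--
--     def is_pattern(patt):
--
--         for i in range(len(pattern)):
--             if pattern[i]=="D":
--                 if int(patt[i])>int(patt[i+1]):
--                     continue
--                 else:
--
--                     return False
--
--             else:
--                 if  int(patt[i])<int(patt[i+1]):
--                     continue
--
--                 else:
--
--                     return False
--
--         return True
--
--
--
--
--
--
--     def backtrack(idx):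
--         if len(path)==len(pattern)+1:
--             if is_pattern(path[:]):
--
--                 ans.append("".join(path[:]))
--             return
--
--
--
--         for i in range(1,len(pattern)+2):
--             if ans:
--                 return
--             if str(i) not in path:
--                 path.append(str(i))
--                 backtrack(idx+1)
--                 path.pop()
--
--
--     backtrack(1)
--     return ans[0]
-- ===== SOURCE B (Python) =====
-- def smallestNumber(pattern: str) -> str:
--     # Greedy closed form: walk the pattern; for each maximal run of 'D's
--     # (any non-'D' character acts as 'I', as in the original's else branch)
--     # emit the run's digit block in reverse. O(n) instead of backtracking.
--     res = []
--     i = 0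
--     n = len(pattern)
--     while i <= n:
--         j = i
--         while j < n and pattern[j] == 'D':
--             j += 1
--         res.extend(str(d) for d in range(j + 1, i, -1))
--         i = j + 1
--     return "".join(res)
-- ===== Notes on version B (the rewrite author's own statement) =====
-- stated objective: faster
-- what changed: Replaced the O(n!*n) backtracking over all digit permutations (testing each completed path against the pattern) with a one-pass closed form that emits each maximal run of 'D's as a reversed block of consecutive digits.
import Mathlib
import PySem

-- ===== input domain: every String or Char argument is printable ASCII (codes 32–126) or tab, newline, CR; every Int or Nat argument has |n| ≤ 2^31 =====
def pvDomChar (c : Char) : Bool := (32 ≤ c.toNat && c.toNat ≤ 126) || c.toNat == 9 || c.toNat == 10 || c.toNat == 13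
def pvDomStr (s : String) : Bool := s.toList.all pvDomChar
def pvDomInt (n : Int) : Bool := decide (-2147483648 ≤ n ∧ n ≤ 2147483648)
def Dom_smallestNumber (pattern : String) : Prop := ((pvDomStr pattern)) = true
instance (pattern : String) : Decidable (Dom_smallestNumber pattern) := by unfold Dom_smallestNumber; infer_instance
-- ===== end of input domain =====

-- B replaces A's O(n!·n) backtracking over digit permutations by a one-pass closed form
-- (each maximal run of 'D's becomes a reversed block of consecutive digits); objective: faster.

-- ===== PORT A =====
-- `int(s)` is transcribed by hand below (pvIntOfStr?): it is the exact CPython/PySem base-10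
-- int() algorithm (strip int-whitespace, optional sign, digits with single '_' between digits);
-- PySem.Int.ofStr? computes the same function, but its digit-parsing helper is a private
-- definition the kernel proofs here could not unfold, so the identical algorithm is inlined.
def pvIsIntSpace (c : Char) : Bool :=
  decide (c = ' ') || decide (c = '\t') || decide (c = '\n') || decide (c = '\x0d') ||
    decide (c = '\x0b') || decide (c = '\x0c')

def pvGo : List Char → Bool → Nat → Option Nat
  | [], afterDigit, acc => if afterDigit = true then some acc else none
  | c :: rest, afterDigit, acc =>
    if c.isDigit = true then pvGo rest true (acc * 10 + (c.toNat - '0'.toNat))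
    else
      if c = '_' ∧ afterDigit = true then
        match rest with
        | d :: _ => if d.isDigit = true then pvGo rest false acc else none
        | [] => none
      else none

def pvVal? : List Char → Option Nat
  | [] => none
  | cs => pvGo cs false 0

def pvIntOfChars? (s : List Char) : Option Int :=
  let cs := (((s.dropWhile pvIsIntSpace).reverse).dropWhile pvIsIntSpace).reverse
  if cs.head? = some '-' then (pvVal? cs.tail).map (fun n => -(n : Int))
  else if cs.head? = some '+' then (pvVal? cs.tail).map (fun n => (n : Int))
  else (pvVal? cs).map (fun n => (n : Int))

def pvIntOfStr? (s : String) : Option Int := pvIntOfChars? s.toList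

-- is_pattern(patt): the check A applies to a completed path (int() raising is unreachable:
-- path entries are str(i); the .getD defaults are the unreachable-IndexError/ValueError arms)
def isPattern (pattern : String) (patt : List String) : Bool :=
  (List.range pattern.toList.length).all (fun i =>
    if (PySem.Str.pyGet? pattern (i : Int)).getD ' ' = 'D' then
      decide ((pvIntOfStr? (PySem.List.pyGetD patt ((i : Int) + 1) "")).getD 0
            < (pvIntOfStr? (PySem.List.pyGetD patt (i : Int) "")).getD 0)
    else
      decide ((pvIntOfStr? (PySem.List.pyGetD patt (i : Int) "")).getD 0
            < (pvIntOfStr? (PySem.List.pyGetD patt ((i : Int) + 1) "")).getD 0))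

-- backtrack: `path`/`ans` are the closure state; the foldl is the `for i in range(1, len+2)`
-- loop, its first branch the `if ans: return` early exit; fuel = number of open slots
-- (recursion only happens at path lengths < len(pattern)+1, where fuel is positive)
def btA (pattern : String) (fuel : Nat) (path ans : List String) : List String :=
  if path.length = pattern.toList.length + 1 then
    (if isPattern pattern path then ans ++ [PySem.Str.join "" path] else ans)
  else
    match fuel with
    | 0 => ans
    | f + 1 =>
      (PySem.List.pyRange 1 ((pattern.toList.length : Int) + 2) 1).foldl
        (fun a i =>
          if a ≠ [] then a
          else if PySem.Int.toStr i ∈ path then a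
          else btA pattern f (path ++ [PySem.Int.toStr i]) a) ans

-- ans[0]: A always finds a match (proved below: ans = [answer]); the [] arm is unreachable
def smallestNumber (pattern : String) : String :=
  (btA pattern (pattern.toList.length + 1) [] []).headI

-- ===== PORT B =====
-- leading run of 'D's (Source B's inner `while j < n and pattern[j] == 'D'` scan)
def pvDRun : List Char → Nat
  | [] => 0
  | c :: rest => if c = 'D' then pvDRun rest + 1 else 0

-- Source B's outer while loop: per block, emit range(j+1, i, -1) and continue at i = j+1
def pvSegs (i : Nat) (l : List Char) : List Nat :=
  (List.range' (i + 1) (pvDRun l + 1)).reverse ++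
    (if h : pvDRun l < l.length then pvSegs (i + pvDRun l + 1) (l.drop (pvDRun l + 1)) else [])
termination_by l.length
decreasing_by simp; omega

def smallestNumber_alt (pattern : String) : String :=
  PySem.Str.join "" ((pvSegs 0 pattern.toList).map (fun d : Nat => PySem.Int.toStr (d : Int)))

-- ===== PRECONDITION & SPEC =====
def Spec_smallestNumber (pattern : String) (out : String) : Prop := out = smallestNumber_alt pattern
instance (pattern : String) (out : String) : Decidable (Spec_smallestNumber pattern out) := by unfold Spec_smallestNumber; infer_instance

-- ===== CLAIM (what is proved, stated in full; the proofs are below) =====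
def Claim_equal_smallestNumber : Prop := ∀ (pattern : String), Dom_smallestNumber pattern → Spec_smallestNumber pattern (smallestNumber pattern)

-- ===== LEMMAS AND PROOFS =====

-- ---- decimal round trip: pvIntOfStr? (str k) = some k ----
def pvStrOf (k : Nat) : String := PySem.Int.toStr (k : Int)

lemma pvDigitChar_toNat (m : Nat) (hm : m < 10) : (Nat.digitChar m).toNat = m + '0'.toNat := by
  interval_cases m <;> decide

lemma pvDigit_not_special (c : Char) (h : c.isDigit = true) :
    c ≠ '-' ∧ c ≠ '+' ∧ pvIsIntSpace c = false := by
  simp [Char.isDigit] at h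
  refine ⟨?_, ?_, ?_⟩
  · rintro rfl; simp_all
  · rintro rfl; simp_all
  · simp only [pvIsIntSpace, Bool.or_eq_false_iff, decide_eq_false_iff_not]
    refine ⟨⟨⟨⟨⟨?_, ?_⟩, ?_⟩, ?_⟩, ?_⟩, ?_⟩ <;> rintro rfl <;> simp_all

lemma pvToDigits_ne_nil (n : Nat) : Nat.toDigits 10 n ≠ [] := by
  rw [Nat.toDigits_eq_if (by norm_num)]
  split <;> simp

lemma pvFoldVal (n : Nat) : ∀ acc : Nat,
    (Nat.toDigits 10 n).foldl (fun a c => a * 10 + (c.toNat - '0'.toNat)) acc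
      = acc * 10 ^ (Nat.toDigits 10 n).length + n := by
  induction n using Nat.strong_induction_on with
  | _ n ih =>
    intro acc
    rw [Nat.toDigits_eq_if (by norm_num)]
    by_cases h : n < 10
    · simp only [if_pos h, List.foldl_cons, List.foldl_nil, List.length_cons, List.length_nil]
      rw [pvDigitChar_toNat n h]
      simp [pow_one]
    · rw [if_neg h, List.foldl_append, List.length_append]
      have hd : n / 10 < n := Nat.div_lt_self (by omega) (by norm_num)
      rw [ih (n / 10) hd acc]
      simp only [List.foldl_cons, List.foldl_nil, List.length_cons, List.length_nil]
      rw [pvDigitChar_toNat (n % 10) (Nat.mod_lt _ (by norm_num))]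
      have := Nat.div_add_mod n 10
      ring_nf
      omega

lemma pvGo_digits (ds : List Char) (h : ∀ c ∈ ds, c.isDigit = true) :
    ∀ acc : Nat, pvGo ds true acc = some (ds.foldl (fun a c => a * 10 + (c.toNat - '0'.toNat)) acc) := by
  induction ds with
  | nil => intro acc; simp [pvGo]
  | cons c rest ih =>
    intro acc
    have hc : c.isDigit = true := h c (by simp)
    simp only [pvGo, if_pos hc, List.foldl_cons]
    exact ih (fun d hd => h d (by simp [hd])) _

lemma pvGo_digits_false (ds : List Char) (hne : ds ≠ []) (h : ∀ c ∈ ds, c.isDigit = true) :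
    pvGo ds false 0 = some (ds.foldl (fun a c => a * 10 + (c.toNat - '0'.toNat)) 0) := by
  cases ds with
  | nil => exact absurd rfl hne
  | cons c rest =>
    have hc : c.isDigit = true := h c (by simp)
    simp only [pvGo, if_pos hc, List.foldl_cons]
    exact pvGo_digits rest (fun d hd => h d (by simp [hd])) _

lemma pvRoundTrip (k : Nat) : pvIntOfStr? (pvStrOf k) = some (k : Int) := by
  unfold pvIntOfStr? pvStrOf
  rw [PySem.Int.toList_toStr]
  have htc : PySem.Int.toChars (k : Int) = Nat.toDigits 10 k := by
    simp [PySem.Int.toChars]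
  rw [htc]
  set ds := Nat.toDigits 10 k with hds
  have hdig : ∀ c ∈ ds, c.isDigit = true :=
    fun c hc => Nat.isDigit_of_mem_toDigits (by norm_num) (by norm_num) hc
  have hne : ds ≠ [] := pvToDigits_ne_nil k
  have hstrip1 : ds.dropWhile pvIsIntSpace = ds := by
    rw [List.dropWhile_eq_self_iff]
    intro hl
    rw [(pvDigit_not_special _ (hdig _ (ds.getElem_mem hl))).2.2]
    simp
  have hstrip2 : ds.reverse.dropWhile pvIsIntSpace = ds.reverse := by
    rw [List.dropWhile_eq_self_iff]
    intro hl
    rw [(pvDigit_not_special _ (hdig _ (by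
      have hmem : ds.reverse[0] ∈ ds.reverse := ds.reverse.getElem_mem hl
      simp only [List.mem_reverse] at hmem
      exact hmem))).2.2]
    simp
  obtain ⟨c, rest, hcr⟩ := List.exists_cons_of_ne_nil hne
  have hc : c.isDigit = true := hdig c (by rw [hcr]; simp)
  obtain ⟨hcm, hcp, _⟩ := pvDigit_not_special c hc
  unfold pvIntOfChars?
  simp only [hstrip1, hstrip2, List.reverse_reverse]
  rw [if_neg (by rw [hcr]; simp [hcm]), if_neg (by rw [hcr]; simp [hcp])]
  have hval : pvVal? ds = some (ds.foldl (fun a c => a * 10 + (c.toNat - '0'.toNat)) 0) := by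
    rw [hcr]; exact pvGo_digits_false _ (by simp) (by rw [← hcr]; exact hdig)
  rw [hval, hds, pvFoldVal k 0]
  simp

lemma pvStrOf_inj : Function.Injective pvStrOf := by
  intro a b h
  have : some (a : Int) = some (b : Int) := by rw [← pvRoundTrip a, ← pvRoundTrip b, h]
  exact_mod_cast Option.some.injEq _ _ ▸ this

-- ---- nat-level validity and the string bridge ----
def pvValidD (pl : List Char) (q : List Nat) : Prop :=
  ∀ i < pl.length, if pl.getD i ' ' = 'D' then q.getD (i+1) 0 < q.getD i 0 else q.getD i 0 < q.getD (i+1) 0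

lemma pvGetD_map (q : List Nat) (f : Nat → String) (i : Nat) (h : i < q.length) :
    (q.map f).getD i "" = f (q.getD i 0) := by
  simp [List.getD, List.getElem?_map, List.getElem?_eq_getElem h]

lemma pvIsPattern_map (pattern : String) (q : List Nat) (hq : q.length = pattern.toList.length + 1) :
    isPattern pattern (q.map pvStrOf) = true ↔ pvValidD pattern.toList q := by
  unfold isPattern pvValidD
  rw [List.all_eq_true]
  have key : ∀ i, i < pattern.toList.length →
      (((if (PySem.Str.pyGet? pattern (i : Int)).getD ' ' = 'D' then
          decide ((pvIntOfStr? (PySem.List.pyGetD (q.map pvStrOf) ((i : Int) + 1) "")).getD 0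
                < (pvIntOfStr? (PySem.List.pyGetD (q.map pvStrOf) (i : Int) "")).getD 0)
        else
          decide ((pvIntOfStr? (PySem.List.pyGetD (q.map pvStrOf) (i : Int) "")).getD 0
                < (pvIntOfStr? (PySem.List.pyGetD (q.map pvStrOf) ((i : Int) + 1) "")).getD 0)) = true)
        ↔ (if pattern.toList.getD i ' ' = 'D' then q.getD (i+1) 0 < q.getD i 0
           else q.getD i 0 < q.getD (i+1) 0)) := by
    intro i hi
    have e0 : (PySem.Str.pyGet? pattern (i : Int)).getD ' ' = pattern.toList.getD i ' ' := by
      simp [List.getD]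
    have e1 : PySem.List.pyGetD (q.map pvStrOf) ((i : Int)) "" = pvStrOf (q.getD i 0) := by
      rw [PySem.List.pyGetD_natCast]
      exact pvGetD_map q _ i (by omega)
    have e2 : PySem.List.pyGetD (q.map pvStrOf) ((i : Int) + 1) "" = pvStrOf (q.getD (i+1) 0) := by
      rw [show ((i : Int) + 1) = ((i + 1 : Nat) : Int) from by push_cast; ring,
        PySem.List.pyGetD_natCast]
      exact pvGetD_map q _ (i+1) (by omega)
    rw [e0, e1, e2, pvRoundTrip, pvRoundTrip]
    simp only [Option.getD_some]
    split <;> simp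
  constructor
  · intro h i hi
    exact (key i hi).mp (h i (List.mem_range.mpr hi))
  · intro h i hi
    exact (key i (List.mem_range.mp hi)).mpr (h i (List.mem_range.mp hi))

-- ---- structure of B's sequence ----
lemma pvDRun_le (l : List Char) : pvDRun l ≤ l.length := by
  induction l with
  | nil => simp [pvDRun]
  | cons c rest ih =>
    simp only [pvDRun, List.length_cons]
    split <;> omega

lemma pvDRun_spec (l : List Char) (j : Nat) (hj : j < pvDRun l) : l.getD j ' ' = 'D' := by
  induction l generalizing j with
  | nil => simp [pvDRun] at hj
  | cons c rest ih =>
    by_cases hc : c = 'D'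
    · cases j with
      | zero => simpa [List.getD]
      | succ j' =>
        simp only [pvDRun, if_pos hc] at hj
        simpa [List.getD] using ih j' (by omega)
    · simp [pvDRun, hc] at hj

lemma pvDRun_stop (l : List Char) (h : pvDRun l < l.length) : l.getD (pvDRun l) ' ' ≠ 'D' := by
  induction l with
  | nil => simp at h
  | cons c rest ih =>
    by_cases hc : c = 'D'
    · simp only [pvDRun, if_pos hc] at h ⊢
      simpa [List.getD] using ih (by simp only [List.length_cons] at h; omega)
    · simp [pvDRun, hc, List.getD]

lemma pvDRun_drop (l : List Char) (m : Nat) (hm : m ≤ pvDRun l) :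
    pvDRun (l.drop m) = pvDRun l - m := by
  induction m generalizing l with
  | zero => simp
  | succ m' ih =>
    cases l with
    | nil => simp [pvDRun] at hm ⊢
    | cons c rest =>
      by_cases hc : c = 'D'
      · simp only [pvDRun, if_pos hc] at hm ⊢
        rw [List.drop_succ_cons, ih rest (by omega)]
        omega
      · simp [pvDRun, hc] at hm

lemma pvSegs_len (i : Nat) (l : List Char) : (pvSegs i l).length = l.length + 1 := by
  induction i, l using pvSegs.induct with
  | _ i l ih =>
    rw [pvSegs]
    by_cases h : pvDRun l < l.length
    · rw [dif_pos h]
      simp only [List.length_append, List.length_reverse, List.length_range', ih h,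
        List.length_drop]
      omega
    · rw [dif_neg h]
      have := pvDRun_le l
      simp only [List.length_append, List.length_reverse, List.length_range', List.length_nil]
      omega

lemma pvSegs_perm (i : Nat) (l : List Char) : (pvSegs i l).Perm (List.range' (i + 1) (l.length + 1)) := by
  induction i, l using pvSegs.induct with
  | _ i l ih =>
    rw [pvSegs]
    by_cases h : pvDRun l < l.length
    · rw [dif_pos h]
      have hsplit : List.range' (i + 1) (l.length + 1)
          = List.range' (i + 1) (pvDRun l + 1) ++ List.range' (i + pvDRun l + 2) (l.length - pvDRun l) := by
        rw [show l.length + 1 = (pvDRun l + 1) + (l.length - pvDRun l) from by omega,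
          ← List.range'_append_1]
        rw [show i + 1 + (pvDRun l + 1) = i + pvDRun l + 2 from by omega]
      rw [hsplit]
      refine List.Perm.append (List.reverse_perm _) ?_
      have hrec := ih h
      simp only [List.length_drop] at hrec
      rw [show l.length - (pvDRun l + 1) + 1 = l.length - pvDRun l from by omega] at hrec
      rw [show i + pvDRun l + 1 + 1 = i + pvDRun l + 2 from by omega] at hrec
      exact hrec
    · rw [dif_neg h]
      have hk : pvDRun l = l.length := by have := pvDRun_le l; omega
      rw [List.append_nil, hk]
      exact List.reverse_perm _

lemma pvSegs_nodup (i : Nat) (l : List Char) : (pvSegs i l).Nodup := by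
  have := pvSegs_perm i l
  exact this.nodup_iff.mpr (List.nodup_range' )

lemma pvSegs_mem (i : Nat) (l : List Char) (x : Nat) :
    x ∈ pvSegs i l ↔ i + 1 ≤ x ∧ x ≤ i + l.length + 1 := by
  rw [(pvSegs_perm i l).mem_iff, List.mem_range'_1]
  omega

-- getD description of pvSegs inside / after the first block
lemma pvSegs_getD_low (i : Nat) (l : List Char) (m : Nat) (hm : m ≤ pvDRun l) :
    (pvSegs i l).getD m 0 = i + pvDRun l + 1 - m := by
  rw [pvSegs]
  rw [List.getD_append _ _ _ _ (by simp only [List.length_reverse, List.length_range']; omega)]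
  rw [List.getD, List.getElem?_reverse (by simp only [List.length_range']; omega),
    List.getElem?_eq_getElem (by simp only [List.length_range']; omega)]
  simp only [List.length_range', List.getElem_range', Option.getD_some]
  omega

lemma pvSegs_getD_high (i : Nat) (l : List Char) (m : Nat) (h : pvDRun l < l.length) :
    (pvSegs i l).getD (pvDRun l + 1 + m) 0
      = (pvSegs (i + pvDRun l + 1) (l.drop (pvDRun l + 1))).getD m 0 := by
  rw [pvSegs, dif_pos h]
  have : pvDRun l + 1 + m = (List.range' (i + 1) (pvDRun l + 1)).reverse.length + m := by simp
  rw [this, List.getD, List.getElem?_append_right (by simp), List.getD]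
  simp

lemma pvSegs_take_low (i : Nat) (l : List Char) (m : Nat) (hm : m ≤ pvDRun l + 1) :
    (pvSegs i l).take m = (List.range' (i + pvDRun l + 2 - m) m).reverse := by
  rw [pvSegs]
  rw [List.take_append_of_le_length (by simp; omega)]
  rw [List.take_reverse, List.drop_range']
  simp only [List.length_range', mul_one]
  rw [show i + 1 + (pvDRun l + 1 - m) = i + pvDRun l + 2 - m from by omega,
    show pvDRun l + 1 - (pvDRun l + 1 - m) = m from by omega]

lemma pvSegs_take_high (i : Nat) (l : List Char) (m : Nat) (h : pvDRun l < l.length) :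
    (pvSegs i l).take (pvDRun l + 1 + m)
      = (List.range' (i + 1) (pvDRun l + 1)).reverse
        ++ (pvSegs (i + pvDRun l + 1) (l.drop (pvDRun l + 1))).take m := by
  rw [pvSegs, dif_pos h]
  have : pvDRun l + 1 + m = (List.range' (i + 1) (pvDRun l + 1)).reverse.length + m := by simp
  rw [this, List.take_append]
  simp

lemma pvSegs_getD_high' (i : Nat) (l : List Char) (j : Nat) (h : pvDRun l < l.length)
    (hj : pvDRun l + 1 ≤ j) :
    (pvSegs i l).getD j 0
      = (pvSegs (i + pvDRun l + 1) (l.drop (pvDRun l + 1))).getD (j - (pvDRun l + 1)) 0 := by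
  have hh := pvSegs_getD_high i l (j - (pvDRun l + 1)) h
  rw [show pvDRun l + 1 + (j - (pvDRun l + 1)) = j from by omega] at hh
  exact hh

lemma pvSegs_valid (i : Nat) (l : List Char) : pvValidD l (pvSegs i l) := by
  induction i, l using pvSegs.induct with
  | _ i l ih =>
    intro j hj
    by_cases hjk : j < pvDRun l
    · rw [if_pos (pvDRun_spec l j hjk)]
      rw [pvSegs_getD_low i l (j+1) (by omega), pvSegs_getD_low i l j (by omega)]
      omega
    · by_cases hjek : j = pvDRun l
      · have hkl : pvDRun l < l.length := by omega
        rw [hjek, if_neg (pvDRun_stop l hkl)]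
        rw [pvSegs_getD_low i l (pvDRun l) (le_refl _)]
        rw [pvSegs_getD_high' i l (pvDRun l + 1) hkl (le_refl _)]
        rw [Nat.sub_self, pvSegs_getD_low _ _ 0 (by omega)]
        omega
      · have hkl : pvDRun l < l.length := by omega
        have hj' : j - (pvDRun l + 1) < (l.drop (pvDRun l + 1)).length := by
          simp only [List.length_drop]; omega
        have hrec := ih hkl (j - (pvDRun l + 1)) hj'
        have hchar : (l.drop (pvDRun l + 1)).getD (j - (pvDRun l + 1)) ' ' = l.getD j ' ' := by
          simp only [List.getD, List.getElem?_drop]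
          congr 2
          omega
        rw [hchar] at hrec
        rw [pvSegs_getD_high' i l j hkl (by omega), pvSegs_getD_high' i l (j+1) hkl (by omega)]
        rw [show j + 1 - (pvDRun l + 1) = j - (pvDRun l + 1) + 1 from by omega]
        exact hrec

-- the counting lemma: few unused values below an out-of-order candidate
lemma pvCard (i : Nat) (l : List Char) : ∀ (m x : Nat), m < l.length + 1 →
    x ∉ (pvSegs i l).take m → i + 1 ≤ x → x < (pvSegs i l).getD m 0 →
    ((Finset.Ico (i + 1) x).filter (fun v => v ∉ (pvSegs i l).take m)).card
      < pvDRun (l.drop m) := by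
  induction i, l using pvSegs.induct with
  | _ i l ih =>
    intro m x hm hnotin hge hlt
    by_cases hmk : m ≤ pvDRun l
    · rw [pvSegs_getD_low i l m hmk] at hlt
      rw [pvDRun_drop l m hmk]
      have hsub : ((Finset.Ico (i + 1) x).filter (fun v => v ∉ (pvSegs i l).take m))
          = Finset.Ico (i + 1) x := by
        apply Finset.filter_true_of_mem
        intro v hv
        rw [Finset.mem_Ico] at hv
        rw [pvSegs_take_low i l m (by omega)]
        simp only [List.mem_reverse, List.mem_range'_1, not_and, not_lt]
        intro hv2
        omega
      rw [hsub, Nat.card_Ico]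
      omega
    · have hkl : pvDRun l < l.length := by have := pvDRun_le l; omega
      obtain ⟨m', rfl⟩ : ∃ m', m = pvDRun l + 1 + m' := ⟨m - (pvDRun l + 1), by omega⟩
      rw [pvSegs_getD_high i l m' hkl] at hlt
      rw [pvSegs_take_high i l m' hkl] at hnotin ⊢
      have hxnB : x ∉ (List.range' (i + 1) (pvDRun l + 1)).reverse := fun hc =>
        hnotin (List.mem_append_left _ hc)
      have hxnT : x ∉ (pvSegs (i + pvDRun l + 1) (l.drop (pvDRun l + 1))).take m' :=
        fun hc => hnotin (List.mem_append_right _ hc)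
      have hxge : i + pvDRun l + 2 ≤ x := by
        by_contra hcon
        exact hxnB (by
          rw [List.mem_reverse, List.mem_range'_1]
          omega)
      have hdrop : l.drop (pvDRun l + 1 + m') = (l.drop (pvDRun l + 1)).drop m' := by
        rw [List.drop_drop]
      rw [hdrop]
      have hih := ih hkl m' x
        (by simp only [List.length_drop]; omega) hxnT (by omega) hlt
      have hset : ((Finset.Ico (i + 1) x).filter (fun v =>
            v ∉ (List.range' (i + 1) (pvDRun l + 1)).reverse
              ++ (pvSegs (i + pvDRun l + 1) (l.drop (pvDRun l + 1))).take m'))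
          = ((Finset.Ico (i + pvDRun l + 1 + 1) x).filter (fun v =>
            v ∉ (pvSegs (i + pvDRun l + 1) (l.drop (pvDRun l + 1))).take m')) := by
        ext v
        simp only [Finset.mem_filter, Finset.mem_Ico, List.mem_append, List.mem_reverse,
          List.mem_range'_1, not_or]
        constructor
        · rintro ⟨⟨h1, h2⟩, hnB, hnT⟩
          exact ⟨⟨by omega, h2⟩, hnT⟩
        · rintro ⟨⟨h1, h2⟩, hnT⟩
          exact ⟨⟨by omega, h2⟩, by omega, hnT⟩
      rw [hset]
      exact hih

-- ---- completions and the backtracking search ----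
def pvComp (pl : List Char) (p : List Nat) : Prop :=
  ∃ q : List Nat, q.length = pl.length + 1 ∧ q.Nodup ∧
    (∀ x ∈ q, 1 ≤ x ∧ x ≤ pl.length + 1) ∧ pvValidD pl q ∧ q.take p.length = p

lemma pvKey (pl : List Char) (m x : Nat) (hm : m < pl.length + 1)
    (hx1 : 1 ≤ x) (hxm : x ∉ (pvSegs 0 pl).take m) (hlt : x < (pvSegs 0 pl).getD m 0) :
    ¬ pvComp pl ((pvSegs 0 pl).take m ++ [x]) := by
  rintro ⟨q, hqlen, hnd, hbnd, hval, htake⟩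
  have hSlen : (pvSegs 0 pl).length = pl.length + 1 := pvSegs_len 0 pl
  have hPlen : ((pvSegs 0 pl).take m).length = m := by
    rw [List.length_take]
    omega
  rw [List.length_append, hPlen, List.length_cons, List.length_nil,
    show m + (0 + 1) = m + 1 from by omega] at htake
  have hr : pvDRun (pl.drop m) ≤ pl.length - m := by
    have := pvDRun_le (pl.drop m)
    simpa using this
  -- q agrees with take m S ++ [x] on the first m+1 positions
  have hqget : ∀ j < m + 1, q.getD j 0 = ((pvSegs 0 pl).take m ++ [x]).getD j 0 := by
    intro j hj
    have h1 : (q.take (m + 1)).getD j 0 = q.getD j 0 := by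
      rw [List.getD_eq_getElem _ _ (by simp; omega), List.getD_eq_getElem _ _ (by omega),
        List.getElem_take]
    rw [← h1, htake]
  have hqm : q.getD m 0 = x := by
    rw [hqget m (by omega), List.getD_eq_getElem _ _ (by simp [hPlen]),
      List.getElem_append_right (by omega)]
    simp [hPlen]
  -- the strictly decreasing chain forced by the 'D' run at position m
  have chain : ∀ j, j ≤ pvDRun (pl.drop m) → q.getD (m + j) 0 + j ≤ x := by
    intro j hj
    induction j with
    | zero => rw [Nat.add_zero, Nat.add_zero, hqm]
    | succ j' ihj =>
      have hD : pl.getD (m + j') ' ' = 'D' := by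
        have h2 := pvDRun_spec (pl.drop m) j' (by omega)
        rwa [List.getD, List.getElem?_drop, ← List.getD] at h2
      have hmj : m + j' < pl.length := by omega
      have hv := hval (m + j') hmj
      rw [hD, if_pos rfl] at hv
      have := ihj (by omega)
      rw [show m + (j' + 1) = m + j' + 1 from by omega]
      omega
  -- each chain value lies in the counted set
  have hvmem : ∀ j, 1 ≤ j → j ≤ pvDRun (pl.drop m) →
      q.getD (m + j) 0 ∈ (Finset.Ico (0 + 1) x).filter (fun v => v ∉ (pvSegs 0 pl).take m) := by
    intro j hj1 hj2
    have hidx : m + j < q.length := by omega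
    rw [Finset.mem_filter, Finset.mem_Ico]
    refine ⟨⟨?_, ?_⟩, ?_⟩
    · have : q.getD (m + j) 0 ∈ q := by
        rw [List.getD_eq_getElem _ _ hidx]
        exact q.getElem_mem hidx
      have := (hbnd _ this).1
      omega
    · have := chain j hj2
      omega
    · intro hmem
      have htq : q.take m = (pvSegs 0 pl).take m := by
        have h5 : (q.take (m + 1)).take m = ((pvSegs 0 pl).take m ++ [x]).take m := by rw [htake]
        rwa [List.take_take, show min m (m + 1) = m from by omega,
          List.take_append_of_le_length (by omega),
          List.take_of_length_le (le_of_eq hPlen)] at h5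
      rw [← htq] at hmem
      have hdisj := List.disjoint_take_drop hnd (le_refl m)
      have hvdrop : q.getD (m + j) 0 ∈ q.drop m := by
        have h6 : j < (q.drop m).length := by simp only [List.length_drop]; omega
        rw [List.getD_eq_getElem q 0 hidx, show q[m + j]'hidx = (q.drop m)[j]'h6 from
          (List.getElem_drop).symm]
        exact (q.drop m).getElem_mem h6
      exact hdisj hmem hvdrop
  -- injectivity of the chain values, then cardinalities clash
  have hinj : Set.InjOn (fun j => q.getD (m + j) 0) (Finset.Icc 1 (pvDRun (pl.drop m))) := by
    intro a ha b hb hab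
    simp only [Finset.coe_Icc, Set.mem_Icc] at ha hb
    have ha2 : m + a < q.length := by omega
    have hb2 : m + b < q.length := by omega
    simp only [List.getD_eq_getElem q 0 ha2, List.getD_eq_getElem q 0 hb2] at hab
    have := (List.Nodup.getElem_inj_iff hnd).mp hab
    omega
  have hmaps : ∀ j ∈ Finset.Icc 1 (pvDRun (pl.drop m)),
      q.getD (m + j) 0 ∈ (Finset.Ico (0 + 1) x).filter (fun v => v ∉ (pvSegs 0 pl).take m) := by
    intro j hj
    rw [Finset.mem_Icc] at hj
    exact hvmem j hj.1 hj.2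
  have hcard := Finset.card_le_card_of_injOn _ hmaps hinj
  rw [Nat.card_Icc] at hcard
  have hlow := pvCard 0 pl m x hm hxm (by omega) hlt
  omega

lemma pvFoldlConst {α β : Type} (f : α → β → α) (l : List β) (a : α)
    (h : ∀ x ∈ l, f a x = a) : l.foldl f a = a := by
  induction l with
  | nil => rfl
  | cons x xs ih =>
    rw [List.foldl_cons, h x (by simp)]
    exact ih (fun y hy => h y (by simp [hy]))

lemma pvMemMap (p : List Nat) (k : Nat) : pvStrOf k ∈ p.map pvStrOf ↔ k ∈ p := by
  constructor
  · intro h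
    obtain ⟨k', hk', heq⟩ := List.mem_map.mp h
    exact pvStrOf_inj heq ▸ hk'
  · exact fun h => List.mem_map.mpr ⟨k, h, rfl⟩

lemma pvNodupSnoc (p : List Nat) (k : Nat) (h : p.Nodup) (hk : k ∉ p) : (p ++ [k]).Nodup := by
  rw [List.nodup_append]
  refine ⟨h, List.nodup_singleton _, ?_⟩
  intro a ha b hb
  rw [List.mem_singleton] at hb
  intro he
  exact hk ((he.trans hb) ▸ ha)

lemma pvFail (pattern : String) : ∀ (fuel : Nat) (p : List Nat) (ans : List String),
    p.Nodup → (∀ x ∈ p, 1 ≤ x ∧ x ≤ pattern.toList.length + 1) →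
    p.length ≤ pattern.toList.length + 1 → ¬ pvComp pattern.toList p →
    btA pattern fuel (p.map pvStrOf) ans = ans := by
  intro fuel
  induction fuel with
  | zero =>
    intro p ans hnd hbnd hlen hnc
    rw [btA]
    by_cases hl : (p.map pvStrOf).length = pattern.toList.length + 1
    · rw [if_pos hl]
      have hplen : p.length = pattern.toList.length + 1 := by simpa using hl
      have hfalse : isPattern pattern (p.map pvStrOf) = false := by
        rw [← Bool.not_eq_true]
        intro htrue
        exact hnc ⟨p, hplen, hnd, hbnd, (pvIsPattern_map pattern p hplen).mp htrue,
          by simp⟩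
      rw [hfalse]
      simp
    · rw [if_neg hl]
  | succ f ihf =>
    intro p ans hnd hbnd hlen hnc
    rw [btA]
    by_cases hl : (p.map pvStrOf).length = pattern.toList.length + 1
    · rw [if_pos hl]
      have hplen : p.length = pattern.toList.length + 1 := by simpa using hl
      have hfalse : isPattern pattern (p.map pvStrOf) = false := by
        rw [← Bool.not_eq_true]
        intro htrue
        exact hnc ⟨p, hplen, hnd, hbnd, (pvIsPattern_map pattern p hplen).mp htrue,
          by simp⟩
      rw [hfalse]
      simp
    · rw [if_neg hl]
      apply pvFoldlConst
      intro i hi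
      by_cases ha : ans ≠ []
      · rw [if_pos ha]
      · rw [if_neg ha]
        rw [PySem.List.mem_pyRange_one] at hi
        have hipos : i = ((i.toNat : Nat) : Int) := by omega
        obtain ⟨hi1, hi2⟩ := hi
        have hts : PySem.Int.toStr i = pvStrOf i.toNat := by
          rw [pvStrOf]
          exact congrArg PySem.Int.toStr hipos
        by_cases hmem : PySem.Int.toStr i ∈ p.map pvStrOf
        · rw [if_pos hmem]
        · rw [if_neg hmem]
          rw [hts] at hmem
          have hknotp : i.toNat ∉ p := fun hc => hmem ((pvMemMap p i.toNat).mpr hc)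
          have hplt : p.length < pattern.toList.length + 1 := by
            have hml : (List.map pvStrOf p).length = p.length := by
              exact List.length_map ..
            rw [hml] at hl
            omega
          have hpath : p.map pvStrOf ++ [PySem.Int.toStr i] = (p ++ [i.toNat]).map pvStrOf := by
            rw [List.map_append, hts]
            rfl
          rw [hpath]
          apply ihf (p ++ [i.toNat]) ans (pvNodupSnoc p i.toNat hnd hknotp)
          · intro y hy
            rcases List.mem_append.mp hy with hy1 | hy2
            · exact hbnd y hy1
            · have hyk : y = i.toNat := by simpa using hy2
              subst hyk
              exact ⟨by omega, by omega⟩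
          · simp only [List.length_append, List.length_cons, List.length_nil]
            omega
          · intro ⟨q, hq1, hq2, hq3, hq4, hq5⟩
            apply hnc
            refine ⟨q, hq1, hq2, hq3, hq4, ?_⟩
            have h6 : q.take p.length = (q.take ((p ++ [i.toNat]).length)).take p.length := by
              rw [List.take_take, show min p.length ((p ++ [i.toNat]).length) = p.length from by
                simp only [List.length_append, List.length_cons, List.length_nil]
                omega]
            rw [h6, hq5, List.take_append_of_le_length (by omega), List.take_of_length_le (by omega)]

lemma pvMain (pattern : String) : ∀ (d m : Nat), m + d = pattern.toList.length + 1 →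
    btA pattern d (((pvSegs 0 pattern.toList).take m).map pvStrOf) []
      = [PySem.Str.join "" ((pvSegs 0 pattern.toList).map pvStrOf)] := by
  intro d
  induction d with
  | zero =>
    intro m hm
    have hS := pvSegs_len 0 pattern.toList
    rw [btA]
    have htk : (pvSegs 0 pattern.toList).take m = pvSegs 0 pattern.toList :=
      List.take_of_length_le (by omega)
    rw [htk, if_pos (by simp only [List.length_map]; omega)]
    rw [(pvIsPattern_map pattern _ (by omega)).mpr (pvSegs_valid 0 pattern.toList)]
    simp
  | succ f ihd =>
    intro m hm
    have hS := pvSegs_len 0 pattern.toList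
    have hSnd := pvSegs_nodup 0 pattern.toList
    have hmlt : m < pattern.toList.length + 1 := by omega
    rw [btA]
    rw [if_neg (by simp only [List.length_map, List.length_take]; omega)]
    have hcmem : (pvSegs 0 pattern.toList).getD m 0 ∈ pvSegs 0 pattern.toList := by
      rw [List.getD_eq_getElem _ _ (by omega)]
      exact List.getElem_mem _
    obtain ⟨hc1, hc2⟩ := (pvSegs_mem 0 pattern.toList _).mp hcmem
    have hcnot : (pvSegs 0 pattern.toList).getD m 0 ∉ (pvSegs 0 pattern.toList).take m := by
      have hdisj := List.disjoint_take_drop hSnd (le_refl m)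
      intro hc
      apply hdisj hc
      have h6 : 0 < ((pvSegs 0 pattern.toList).drop m).length := by
        simp only [List.length_drop]; omega
      rw [List.getD_eq_getElem _ _ (by omega),
        show (pvSegs 0 pattern.toList)[m]'(by omega) = ((pvSegs 0 pattern.toList).drop m)[0]'h6
          from by rw [List.getElem_drop]; rfl]
      exact ((pvSegs 0 pattern.toList).drop m).getElem_mem h6
    -- split the loop range at c := S.getD m 0
    rw [PySem.List.pyRange_one_append 1 (((pvSegs 0 pattern.toList).getD m 0 : Nat) : Int)
      ((pattern.toList.length : Int) + 2) (by push_cast; omega) (by push_cast; omega),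
      List.foldl_append]
    -- phase 1: all smaller candidates die
    have hph1 : (PySem.List.pyRange 1 (((pvSegs 0 pattern.toList).getD m 0 : Nat) : Int) 1).foldl
        (fun a i =>
          if a ≠ [] then a
          else if PySem.Int.toStr i ∈ ((pvSegs 0 pattern.toList).take m).map pvStrOf then a
          else btA pattern f (((pvSegs 0 pattern.toList).take m).map pvStrOf
            ++ [PySem.Int.toStr i]) a) [] = [] := by
      apply pvFoldlConst
      intro i hi
      rw [PySem.List.mem_pyRange_one] at hi
      obtain ⟨hi1, hi2⟩ := hi
      rw [if_neg (by simp)]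
      have hipos : i = ((i.toNat : Nat) : Int) := by omega
      have hts : PySem.Int.toStr i = pvStrOf i.toNat := by
        rw [pvStrOf]
        exact congrArg PySem.Int.toStr hipos
      by_cases hmem : PySem.Int.toStr i ∈ ((pvSegs 0 pattern.toList).take m).map pvStrOf
      · rw [if_pos hmem]
      · rw [if_neg hmem]
        rw [hts] at hmem
        have hknot : i.toNat ∉ (pvSegs 0 pattern.toList).take m :=
          fun hc => hmem ((pvMemMap _ i.toNat).mpr hc)
        have hpath : ((pvSegs 0 pattern.toList).take m).map pvStrOf ++ [PySem.Int.toStr i]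
            = ((pvSegs 0 pattern.toList).take m ++ [i.toNat]).map pvStrOf := by
          rw [List.map_append, hts]
          rfl
        rw [hpath]
        apply pvFail pattern f _ []
        · exact pvNodupSnoc _ _ ((List.take_sublist m _).nodup hSnd) hknot
        · intro y hy
          rcases List.mem_append.mp hy with hy1 | hy2
          · have hyS := (pvSegs_mem 0 pattern.toList y).mp (List.mem_of_mem_take hy1)
            exact ⟨by omega, by omega⟩
          · have hyk : y = i.toNat := by simpa using hy2
            subst hyk
            exact ⟨by omega, by omega⟩
        · simp only [List.length_append, List.length_take, List.length_cons, List.length_nil]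
          omega
        · exact pvKey pattern.toList m i.toNat hmlt (by omega) hknot (by omega)
    rw [hph1]
    -- the candidate c itself succeeds
    rw [PySem.List.pyRange_one_cons (by push_cast; omega), List.foldl_cons]
    have hstep : (if ([] : List String) ≠ [] then ([] : List String)
        else if PySem.Int.toStr (((pvSegs 0 pattern.toList).getD m 0 : Nat) : Int)
            ∈ ((pvSegs 0 pattern.toList).take m).map pvStrOf then ([] : List String)
        else btA pattern f (((pvSegs 0 pattern.toList).take m).map pvStrOf
          ++ [PySem.Int.toStr (((pvSegs 0 pattern.toList).getD m 0 : Nat) : Int)]) [])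
        = [PySem.Str.join "" ((pvSegs 0 pattern.toList).map pvStrOf)] := by
      rw [if_neg (by simp)]
      rw [show PySem.Int.toStr (((pvSegs 0 pattern.toList).getD m 0 : Nat) : Int)
          = pvStrOf ((pvSegs 0 pattern.toList).getD m 0) from rfl]
      rw [if_neg (fun hc => hcnot ((pvMemMap _ _).mp hc))]
      have hpath2 : ((pvSegs 0 pattern.toList).take m).map pvStrOf
            ++ [pvStrOf ((pvSegs 0 pattern.toList).getD m 0)]
          = ((pvSegs 0 pattern.toList).take (m+1)).map pvStrOf := by
        rw [List.take_succ, List.map_append]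
        congr 1
        rw [List.getElem?_eq_getElem (by omega)]
        rw [List.getD_eq_getElem _ _ (by omega)]
        rfl
      rw [hpath2]
      exact ihd (m+1) (by omega)
    rw [hstep]
    -- phase 3: the answer is found, the rest of the loop is skipped
    apply pvFoldlConst
    intro i hi
    rw [if_pos (by simp)]

-- ===== VERDICT (by name: the statement is the Claim_ definition above) =====
theorem smallestNumber_spec : Claim_equal_smallestNumber := by
  intro pattern _
  unfold Spec_smallestNumber smallestNumber smallestNumber_alt
  have h := pvMain pattern (pattern.toList.length + 1) 0 (by omega)
  simp only [List.take_zero, List.map_nil] at h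
  rw [h]
  rfl
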